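-- pv_equiv track=rewrite | github.com/beetrootfarmer/TIL | 네비게이션.py | solution
-- ===== SOURCE A (Python) =====
-- def solution(path):
--     patharr= []
--     for i in path:
--         patharr.append(i)
--     answer =[]
--     count = 1
--     time = 0
--     nowon = str(patharr[0])
--     d = ""
--
--     def direction(dir):
--         if dir == 'E':
--             direct = 1
--         elif dir == 'S':
--             direct = 2
--         elif dir == 'W':
--             direct = 3
--         else: direct = 4
--         return int(direct)
--
--
--     for i in range(1,len(path)):
--         if i == int(len(path)-1): #마지막이면 더이상 추적X break
--             break
--         else :
--             if nowon == str(patharr[i]) :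
--                 count += 1
--             else:
--                 if (direction(nowon)-direction(patharr[i]) == 1 ) or (direction(nowon)-direction(patharr[i]) == -3) :
--                     d = 'left'
--                 else : d = 'right'
--                 if count > 5:
--                     n = count - 5
--                     count = 5
--                     time += n
--                     # if time == 0 :
--                     #     time = 1
--                 answer.append("Time "+ str(time)+": "+"Go straight "+str(count*100)+"m and turn "+d)
--                 time += count
--                 count = 1
--             nowon = str(patharr[i])
--     return answer
-- ===== SOURCE B (Python) =====
-- def solution(path):
--     # Run-length decomposition: group the examined prefix path[:-1] into runs,
--     # then emit one instruction per adjacent run pair (the last run is never emitted).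
--     dirs = {'E': 1, 'S': 2, 'W': 3}
--     runs = []
--     for c in path[:len(path) - 1]:
--         if runs and runs[-1][0] == c:
--             runs[-1][1] += 1
--         else:
--             runs.append([c, 1])
--     answer = []
--     time = 0
--     for (c, n), (nc, _) in zip(runs, runs[1:]):
--         diff = dirs.get(c, 4) - dirs.get(nc, 4)
--         turn = 'left' if diff == 1 or diff == -3 else 'right'
--         t = time + (n - 5 if n > 5 else 0)
--         m = 5 if n > 5 else n
--         answer.append("Time " + str(t) + ": Go straight " + str(m * 100) + "m and turn " + turn)
--         time = t + m
--     return answer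
-- ===== Notes on version B (the rewrite author's own statement) =====
-- stated objective: alternative
-- what changed: B replaces A's index loop with break flag and inline state machine by a two-phase decomposition: run-length-encode the examined prefix path[:-1], then emit one instruction per adjacent run pair; the last run is never emitted, matching A's missing flush.
import Mathlib
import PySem

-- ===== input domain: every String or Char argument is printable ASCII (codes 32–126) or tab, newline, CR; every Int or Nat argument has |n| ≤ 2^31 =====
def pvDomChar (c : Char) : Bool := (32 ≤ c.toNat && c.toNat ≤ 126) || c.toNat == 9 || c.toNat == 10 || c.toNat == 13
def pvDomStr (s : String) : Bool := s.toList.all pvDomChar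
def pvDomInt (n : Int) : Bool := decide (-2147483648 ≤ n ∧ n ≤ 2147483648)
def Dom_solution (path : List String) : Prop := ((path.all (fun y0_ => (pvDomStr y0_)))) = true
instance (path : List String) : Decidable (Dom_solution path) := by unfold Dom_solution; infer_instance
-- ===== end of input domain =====

-- B re-implements the navigation builder by run-length-encoding the examined prefix and
-- emitting one instruction per adjacent run pair (objective: simpler decomposition, same cost).
-- A mutates only locals; no observable side effects.

-- ===== PORT A =====
def direction (dir : String) : Int :=
  if dir == "E" then 1
  else if dir == "S" then 2
  else if dir == "W" then 3
  else 4

-- the body of A's `for i in range(1, len(path))` loop; the Bool is the `break` flag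
def loopA (patharr : List String) (len : Int)
    (st : Bool × List String × Int × Int × String) (i : Int) :
    Bool × List String × Int × Int × String :=
  if st.1 then st
  else if i = len - 1 then (true, st.2)          -- break at the last index
  else
    match PySem.List.pyGet? patharr i with       -- patharr[i]; in range for 1 ≤ i < len
    | none => st
    | some pi =>
      if st.2.2.2.2 == pi then (false, st.2.1, st.2.2.1 + 1, st.2.2.2.1, pi)
      else
        let d := if direction st.2.2.2.2 - direction pi = 1 ∨ direction st.2.2.2.2 - direction pi = -3
                 then "left" else "right"
        let ct : Int × Int := if st.2.2.1 > 5 then (5, st.2.2.2.1 + (st.2.2.1 - 5)) else (st.2.2.1, st.2.2.2.1)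
        (false,
         st.2.1 ++ ["Time " ++ PySem.Int.toStr ct.2 ++ ": " ++ "Go straight " ++
                    PySem.Int.toStr (ct.1 * 100) ++ "m and turn " ++ d],
         1, ct.2 + ct.1, pi)

def solution (path : List String) : List String :=
  let patharr := path.foldl (fun acc i => acc ++ [i]) []
  match patharr.head? with                       -- patharr[0]: IndexError on [], excluded by Pre_
  | none => []
  | some p0 =>
    let fin := (PySem.List.pyRange 1 (path.length : Int) 1).foldl
      (loopA patharr (path.length : Int)) (false, [], 1, 0, p0)
    fin.2.1

-- ===== PORT B =====
def dirsB : PySem.Dict String Int := ((PySem.Dict.empty.insert "E" 1).insert "S" 2).insert "W" 3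

-- run builder: extend the last run or start a new one
def buildStep (runs : List (String × Int)) (c : String) : List (String × Int) :=
  match runs.getLast? with
  | some last => if last.1 == c then runs.dropLast ++ [(last.1, last.2 + 1)] else runs ++ [(c, 1)]
  | none => [(c, 1)]

-- emitter over an adjacent run pair ((c, n), (nc, _)), state (answer, time)
def emitStep (st : List String × Int) (pr : (String × Int) × (String × Int)) : List String × Int :=
  let diff := PySem.Dict.getD dirsB pr.1.1 4 - PySem.Dict.getD dirsB pr.2.1 4
  let turn := if diff = 1 ∨ diff = -3 then "left" else "right"
  let t := st.2 + (if pr.1.2 > 5 then pr.1.2 - 5 else 0)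
  let m := if pr.1.2 > 5 then (5 : Int) else pr.1.2
  (st.1 ++ ["Time " ++ PySem.Int.toStr t ++ ": Go straight " ++ PySem.Int.toStr (m * 100) ++
            "m and turn " ++ turn], t + m)

def solution_alt (path : List String) : List String :=
  let runs := (PySem.List.slice path none (some ((path.length : Int) - 1))).foldl buildStep []
  let fin := (runs.zip (PySem.List.slice runs (some 1) none)).foldl emitStep ([], 0)
  fin.1

-- ===== PRECONDITION & SPEC =====
-- A raises IndexError on the empty path (patharr[0]); Pre_ excludes exactly that input.
def Pre_solution (path : List String) : Prop := path ≠ []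
instance (path : List String) : Decidable (Pre_solution path) := by unfold Pre_solution; infer_instance
def pvWitness_solution : List String := ["E", "E", "S", "S", "W", "E"]

def Spec_solution (path : List String) (out : List String) : Prop := out = solution_alt path
instance (path : List String) (out : List String) : Decidable (Spec_solution path out) := by unfold Spec_solution; infer_instance

-- ===== CLAIM (what is proved, stated in full; the proofs are below) =====
def Claim_equal_solution : Prop := ∀ (path : List String), Dom_solution path → Pre_solution path → Spec_solution path (solution path)

-- ===== LEMMAS AND PROOFS =====

-- common vocabulary for both loop shapes
def turnStr (c nc : String) : String :=
  if direction c - direction nc = 1 ∨ direction c - direction nc = -3 then "left" else "right"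

def entryStr (t m : Int) (d : String) : String :=
  "Time " ++ PySem.Int.toStr t ++ ": Go straight " ++ PySem.Int.toStr (m * 100) ++ "m and turn " ++ d

-- A's per-element step once the index plumbing and break flag are removed
def stepA (st : List String × Int × Int × String) (x : String) : List String × Int × Int × String :=
  if st.2.2.2 == x then (st.1, st.2.1 + 1, st.2.2.1, x)
  else
    let t := st.2.2.1 + (if st.2.1 > 5 then st.2.1 - 5 else 0)
    let m := if st.2.1 > 5 then (5 : Int) else st.2.1
    (st.1 ++ [entryStr t m (turnStr st.2.2.2 x)], 1, t + m, x)

-- run-length encoding of a carried run (c, n) followed by l, returned head-exposed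
def rleFrom (c : String) (n : Int) : List String → (String × Int) × List (String × Int)
  | [] => ((c, n), [])
  | x :: xs =>
    if c == x then rleFrom c (n + 1) xs
    else ((c, n), (rleFrom x 1 xs).1 :: (rleFrom x 1 xs).2)

-- the instruction list produced from a run list (the final run is never emitted)
def emit (time : Int) : List (String × Int) → List String
  | [] => []
  | [_] => []
  | (c, n) :: (nc, m) :: rs =>
    let t := time + (if n > 5 then n - 5 else 0)
    let k := if n > 5 then (5 : Int) else n
    entryStr t k (turnStr c nc) :: emit (t + k) ((nc, m) :: rs)

theorem dirsB_getD (c : String) : PySem.Dict.getD dirsB c 4 = direction c := by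
  simp [dirsB, direction, PySem.Dict.getD, PySem.Dict.get?, PySem.Dict.insert, PySem.Dict.empty]
  split_ifs with h1 h2 h3
  · subst h1; decide
  · subst h2; simp [List.find?, show ("E" == "S") = false by decide]
  · subst h3; simp [List.find?]
  · have e1 : ("E" == c) = false := by simp [beq_eq_false_iff_ne]; exact Ne.symm h1
    have e2 : ("S" == c) = false := by simp [beq_eq_false_iff_ne]; exact Ne.symm h2
    have e3 : ("W" == c) = false := by simp [beq_eq_false_iff_ne]; exact Ne.symm h3
    simp [List.find?, e1, e2, e3]

theorem rleFrom_fst_fst (l : List String) (c : String) (n : Int) : (rleFrom c n l).1.1 = c := by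
  induction l generalizing n with
  | nil => rfl
  | cons x xs ih => by_cases h : c == x <;> simp [rleFrom, h, ih]

theorem emit_cons₂ (time : Int) (c : String) (n : Int) (r : String × Int) (rs : List (String × Int)) :
    emit time ((c, n) :: r :: rs) =
      entryStr (time + (if n > 5 then n - 5 else 0)) (if n > 5 then (5 : Int) else n) (turnStr c r.1) ::
        emit (time + (if n > 5 then n - 5 else 0) + (if n > 5 then (5 : Int) else n)) (r :: rs) := by
  obtain ⟨nc, m⟩ := r; rfl

theorem foldA_emit (l : List String) (ans : List String) (cnt time : Int) (c : String) :
    (l.foldl stepA (ans, cnt, time, c)).1 =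
      ans ++ emit time ((rleFrom c cnt l).1 :: (rleFrom c cnt l).2) := by
  induction l generalizing ans cnt time c with
  | nil => simp [rleFrom, emit]
  | cons x xs ih =>
    by_cases h : c == x
    · have hc : c = x := by simpa [beq_iff_eq] using h
      subst hc
      simp only [List.foldl_cons, stepA, rleFrom, h, if_pos]
      exact ih ans (cnt + 1) time c
    · simp only [List.foldl_cons, stepA, rleFrom, h, if_neg, Bool.false_eq_true, not_false_iff]
      rw [ih, emit_cons₂, rleFrom_fst_fst]
      simp [List.append_assoc]

theorem build_concat (l : List String) (rs : List (String × Int)) (c : String) (n : Int) :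
    l.foldl buildStep (rs ++ [(c, n)]) = rs ++ (rleFrom c n l).1 :: (rleFrom c n l).2 := by
  induction l generalizing rs c n with
  | nil => simp [rleFrom]
  | cons x xs ih =>
    by_cases h : c == x
    · simp only [List.foldl_cons, buildStep, List.getLast?_concat, rleFrom, h, if_pos,
        List.dropLast_concat]
      exact ih rs c (n + 1)
    · simp only [List.foldl_cons, buildStep, List.getLast?_concat, rleFrom, h, if_neg,
        Bool.false_eq_true, not_false_iff]
      rw [List.append_assoc]
      rw [show [(c, n)] ++ [(x, 1)] = [(c, n)] ++ [(x, 1)] from rfl, ← List.append_assoc,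
        ih (rs ++ [(c, n)]) x 1]
      simp [List.append_assoc]

theorem foldB_emit (runs : List (String × Int)) (ans : List String) (time : Int) :
    ((runs.zip runs.tail).foldl emitStep (ans, time)).1 = ans ++ emit time runs := by
  induction runs generalizing ans time with
  | nil => simp [emit]
  | cons r rest ih =>
    cases rest with
    | nil => simp [emit]
    | cons r2 rs =>
      simp only [List.tail_cons, List.zip_cons_cons, List.foldl_cons]
      have hstep : emitStep (ans, time) (r, r2) =
          (ans ++ [entryStr (time + (if r.2 > 5 then r.2 - 5 else 0))
            (if r.2 > 5 then (5 : Int) else r.2) (turnStr r.1 r2.1)],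
           time + (if r.2 > 5 then r.2 - 5 else 0) + (if r.2 > 5 then (5 : Int) else r.2)) := by
        simp [emitStep, dirsB_getD, turnStr, entryStr]
      rw [hstep]
      have ih' := ih (ans ++ [entryStr (time + (if r.2 > 5 then r.2 - 5 else 0))
            (if r.2 > 5 then (5 : Int) else r.2) (turnStr r.1 r2.1)])
            (time + (if r.2 > 5 then r.2 - 5 else 0) + (if r.2 > 5 then (5 : Int) else r.2))
      simp only [List.tail_cons] at ih'
      obtain ⟨c, n⟩ := r
      rw [ih', emit_cons₂]
      simp [List.append_assoc]

theorem slice_dropLast (xs : List String) :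
    PySem.List.slice xs none (some ((xs.length : Int) - 1)) = xs.dropLast := by
  cases xs with
  | nil => rfl
  | cons a t => rw [show (((a :: t).length : Int) - 1) = ((t.length : Nat) : Int) by simp,
      PySem.List.slice_to_natCast]; simp [List.dropLast_eq_take]

theorem solution_alt_eq (p0 : String) (rest : List String) :
    solution_alt (p0 :: rest) =
      emit 0 ((rleFrom p0 1 rest.dropLast).1 :: (rleFrom p0 1 rest.dropLast).2) := by
  cases rest with
  | nil => rfl
  | cons r rs =>
    have hbuild : ((p0 :: r :: rs).dropLast).foldl buildStep [] =
        (rleFrom p0 1 (r :: rs).dropLast).1 :: (rleFrom p0 1 (r :: rs).dropLast).2 := by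
      rw [List.dropLast_cons_of_ne_nil (by simp), List.foldl_cons,
        show buildStep [] p0 = [] ++ [(p0, 1)] from rfl, build_concat]
      simp
    simp only [solution_alt, slice_dropLast, hbuild, PySem.List.slice_from_one]
    rw [foldB_emit]
    simp

-- the loop body on an in-range, non-final index is stepA on the dropLast element
theorem loopA_step (path : List String) (st : List String × Int × Int × String) (i : Int)
    (h1 : 1 ≤ i) (h2 : i < (path.length : Int) - 1) :
    loopA path (path.length : Int) (false, st) i =
      (false, stepA st (PySem.List.pyGetD path.dropLast i "")) := by
  have hdl : i.toNat < path.dropLast.length := by simp; omega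
  have hget : PySem.List.pyGet? path i = some (PySem.List.pyGetD path.dropLast i "") := by
    rw [PySem.List.pyGet?_eq_some_getElem path (by omega) (by omega),
      PySem.List.pyGetD_eq_getElem path.dropLast "" (by omega) (by simp; omega),
      List.getElem_dropLast hdl]
  have hne : ¬ i = (path.length : Int) - 1 := by omega
  simp only [loopA, stepA, hget, hne, Bool.false_eq_true, if_false]
  by_cases hx : st.2.2.2 == PySem.List.pyGetD path.dropLast i ""
  · simp [hx]
  · by_cases h5 : st.2.1 > 5 <;>
      simp [hx, h5, turnStr, entryStr, String.append_assoc]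

theorem stage1 (path : List String) (l : List Int) (st : List String × Int × Int × String)
    (hl : ∀ i ∈ l, 1 ≤ i ∧ i < (path.length : Int) - 1) :
    l.foldl (loopA path (path.length : Int)) (false, st) =
      (false, l.foldl (fun s i => stepA s (PySem.List.pyGetD path.dropLast i "")) st) := by
  induction l generalizing st with
  | nil => rfl
  | cons i t ih =>
    obtain ⟨hi1, hi2⟩ := hl i (by simp)
    simp only [List.foldl_cons, loopA_step path st i hi1 hi2]
    exact ih _ (fun j hj => hl j (by simp [hj]))

theorem solution_eq (p0 : String) (rest : List String) :
    solution (p0 :: rest) = ((rest.dropLast).foldl stepA ([], 1, 0, p0)).1 := by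
  have hpatharr : (p0 :: rest).foldl (fun acc i => acc ++ [i]) [] = p0 :: rest :=
    PySem.List.foldl_append_singleton _ _
  cases rest with
  | nil =>
    simp only [solution, hpatharr, List.head?_cons]
    rw [show (([p0] : List String).length : Int) = 1 by simp,
      PySem.List.pyRange_one_eq_nil (by omega)]
    rfl
  | cons r rs =>
    simp only [solution, hpatharr, List.head?_cons]
    have h2 : (2 : Int) ≤ ((p0 :: r :: rs).length : Int) := by simp; omega
    rw [PySem.List.pyRange_one_append 1 (((p0 :: r :: rs).length : Int) - 1) _ (by omega) (by omega),
      List.foldl_append,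
      stage1 (p0 :: r :: rs) _ _ (fun i hi => by
        rw [PySem.List.mem_pyRange_one] at hi; exact ⟨hi.1, hi.2⟩)]
    rw [show (((p0 :: r :: rs).length : Int) - 1) = ((p0 :: r :: rs).dropLast.length : Int) by
        simp]
    rw [PySem.List.foldl_pyRange_pyGetD' (p0 :: r :: rs).dropLast "" stepA ([], 1, 0, p0)
      (by omega : (0:Int) ≤ 1)]
    have hfin : ∀ S : List String × Int × Int × String,
        List.foldl (loopA (p0 :: r :: rs) ((p0 :: r :: rs).length : Int)) (false, S)
          (PySem.List.pyRange (((p0 :: r :: rs).dropLast.length : Nat) : Int)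
            ((p0 :: r :: rs).length : Int)) = (true, S) := by
      intro S
      rw [show ((p0 :: r :: rs).length : Int) = (((p0 :: r :: rs).dropLast.length : Nat) : Int) + 1 by
          simp, PySem.List.pyRange_one_singleton]
      simp only [List.foldl_cons, List.foldl_nil, loopA, Bool.false_eq_true, if_false]
      rw [if_pos (by simp)]
    rw [hfin]
    simp

-- ===== VERDICT (by name: the statement is the Claim_ definition above) =====
theorem solution_spec : Claim_equal_solution := by
  intro path _ hpre
  unfold Spec_solution
  cases path with
  | nil => exact absurd rfl hpre
  | cons p0 rest =>
    rw [solution_eq, solution_alt_eq, foldA_emit]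
    simp
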